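-- pv_equiv track=rewrite | github.com/Rickyz03/AI-Agent-Email | backend/ingestion/parser.py | remove_signatures_and_quotes
-- ===== SOURCE A (Python) =====
-- def remove_signatures_and_quotes(text: str) -> str:
--     lines = text.splitlines()
--     cleaned = []
--     for line in lines:
--         if line.strip().startswith(">"):
--             continue
--         if line.strip().startswith("--"):
--             break
--         cleaned.append(line)
--     return "\n".join(cleaned)
-- ===== SOURCE B (Python) =====
-- def remove_signatures_and_quotes(text: str) -> str:
--     lines = text.splitlines()
--     cut = next((i for i, l in enumerate(lines) if l.strip().startswith("--")), len(lines))
--     return "\n".join(l for l in lines[:cut] if not l.strip().startswith(">"))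
-- ===== Notes on version B (the rewrite author's own statement) =====
-- stated objective: alternative
-- what changed: Replaces the single interleaved continue/break/append loop by a two-pass decomposition: first locate the signature cut point (first line whose strip starts with '--') and truncate, then filter out quoted lines from that prefix and join.
import Mathlib
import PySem

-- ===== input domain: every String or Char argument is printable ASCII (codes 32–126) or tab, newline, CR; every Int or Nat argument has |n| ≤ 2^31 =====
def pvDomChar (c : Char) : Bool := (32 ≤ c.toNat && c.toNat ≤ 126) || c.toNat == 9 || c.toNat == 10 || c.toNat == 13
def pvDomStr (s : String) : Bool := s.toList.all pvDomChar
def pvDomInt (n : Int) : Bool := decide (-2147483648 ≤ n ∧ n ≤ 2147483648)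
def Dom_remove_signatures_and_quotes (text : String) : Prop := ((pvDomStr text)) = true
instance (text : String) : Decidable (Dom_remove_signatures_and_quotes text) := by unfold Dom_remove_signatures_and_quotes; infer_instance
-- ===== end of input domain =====

-- B restates A as truncate-at-signature then filter-quotes (two passes); same O(n) cost, no behavioural change.

-- ===== PORT A =====
-- the for-loop with continue/break/append, as structural recursion
def pvALoop : List String → List String
  | [] => []
  | l :: rest =>
    if PySem.Str.startswith (PySem.Str.strip l) ">" then pvALoop rest
    else if PySem.Str.startswith (PySem.Str.strip l) "--" then []
    else l :: pvALoop rest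

def remove_signatures_and_quotes (text : String) : String :=
  PySem.Str.join "\n" (pvALoop (PySem.Str.splitlines text))

-- ===== PORT B =====
def remove_signatures_and_quotes_alt (text : String) : String :=
  let lines := PySem.Str.splitlines text
  let cut := (lines.findIdx? (fun l => PySem.Str.startswith (PySem.Str.strip l) "--")).getD lines.length
  PySem.Str.join "\n" ((lines.take cut).filter (fun l => !PySem.Str.startswith (PySem.Str.strip l) ">"))

-- ===== PRECONDITION & SPEC =====
def Spec_remove_signatures_and_quotes (text : String) (out : String) : Prop := out = remove_signatures_and_quotes_alt text
instance (text : String) (out : String) : Decidable (Spec_remove_signatures_and_quotes text out) := by unfold Spec_remove_signatures_and_quotes; infer_instance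

-- ===== CLAIM (what is proved, stated in full; the proofs are below) =====
def Claim_equal_remove_signatures_and_quotes : Prop := ∀ (text : String), Dom_remove_signatures_and_quotes text → Spec_remove_signatures_and_quotes text (remove_signatures_and_quotes text)

-- ===== LEMMAS AND PROOFS =====

-- a string whose strip starts with ">" cannot also have its strip start with "--"
theorem pv_quote_not_dash (s : String) (h : PySem.Str.startswith s ">" = true) :
    PySem.Str.startswith s "--" = false := by
  simp only [PySem.Str.startswith_eq] at *
  rw [PySem.Chars.startswith_iff] at h
  by_contra hd
  rw [Bool.not_eq_false, PySem.Chars.startswith_iff] at hd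
  obtain ⟨t1, h1⟩ := h
  obtain ⟨t2, h2⟩ := hd
  rw [← h1] at h2
  have : ('-' : Char) = '>' := by
    have := congrArg (fun l => l.head?) h2
    simp at this
  simp at this

-- the cut index of a cons whose head does not match is one more than the tail's cut index
theorem pv_cut_cons {α : Type} (p : α → Bool) (l : α) (rest : List α) (h : p l = false) :
    ((List.findIdx? p (l :: rest)).getD (l :: rest).length)
      = ((List.findIdx? p rest).getD rest.length) + 1 := by
  rw [List.findIdx?_cons, h]
  cases List.findIdx? p rest <;> simp

theorem pv_loop_eq (lines : List String) :
    pvALoop lines =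
      (lines.take ((lines.findIdx? (fun l => PySem.Str.startswith (PySem.Str.strip l) "--")).getD lines.length)).filter
        (fun l => !PySem.Str.startswith (PySem.Str.strip l) ">") := by
  induction lines with
  | nil => rfl
  | cons l rest ih =>
    by_cases hd : PySem.Str.startswith (PySem.Str.strip l) "--" = true
    · have hq : PySem.Str.startswith (PySem.Str.strip l) ">" = false := by
        by_contra hq
        rw [Bool.not_eq_false] at hq
        rw [pv_quote_not_dash _ hq] at hd
        exact Bool.false_ne_true hd
      simp only [pvALoop, hq, hd, List.findIdx?_cons, if_true, Option.getD_some,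
        List.take_zero, List.filter_nil, Bool.false_eq_true, if_false]
    · simp only [Bool.not_eq_true] at hd
      rw [pv_cut_cons (fun l => PySem.Str.startswith (PySem.Str.strip l) "--") l rest hd,
        List.take_succ_cons, List.filter_cons]
      by_cases hq : PySem.Str.startswith (PySem.Str.strip l) ">" = true
      · simp only [pvALoop, hq, hd, ih, Bool.not_true, Bool.false_eq_true, if_false, if_true]
      · simp only [Bool.not_eq_true] at hq
        simp only [pvALoop, hq, hd, ih, Bool.not_false, Bool.false_eq_true, if_false, if_true]

-- ===== VERDICT (by name: the statement is the Claim_ definition above) =====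
theorem remove_signatures_and_quotes_spec : Claim_equal_remove_signatures_and_quotes := by
  intro text _
  unfold Spec_remove_signatures_and_quotes remove_signatures_and_quotes remove_signatures_and_quotes_alt
  rw [pv_loop_eq]
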